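-- pv_equiv track=rewrite | github.com/AdamZhouSE/pythonHomework | Code/CodeRecords/2530/60788/260266.py | f
-- ===== SOURCE A (Python) =====
-- class Chara:
--     def __init__(self,value,index):
--         self.value=value
--         self.index=index
--
-- def f(s,t):
--     c={}
--     for i in list(s):
--         c[i]=s.index(i)
--     m=[]
--     n=[' ']*len(t)
--     for i in range(len(t)):
--         if t[i] in s:
--             m.append(Chara(t[i],c[t[i]]))
--         else:
--             n[i]=t[i]
--     m.sort(key=lambda x:x.index)
--     p=0
--     q=0
--     while q<len(n):
--         if n[q]==' ':
--             n[q]=m[p].value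
--             p+=1
--         q+=1
--     return ''.join(n)
-- ===== SOURCE B (Python) =====
-- def f(s, t):
--     in_s = set(s)
--     cnt = {}
--     for ch in t:
--         if ch in in_s:
--             cnt[ch] = cnt.get(ch, 0) + 1
--     ordered = []
--     seen = set()
--     for ch in s:
--         if ch not in seen:
--             seen.add(ch)
--             ordered.extend([ch] * cnt.get(ch, 0))
--     it = iter(ordered)
--     return ''.join(next(it) if ch in in_s else ch for ch in t)
-- ===== Notes on version B (the rewrite author's own statement) =====
-- stated objective: faster
-- what changed: Replaces A's comparison sort of index-decorated characters (built with per-character s.index scans) by a counting sort: one pass counts each kept character of t, one pass over s emits each distinct character count-many times in first-occurrence order, with no sort and no index keys at all.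
import Mathlib
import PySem

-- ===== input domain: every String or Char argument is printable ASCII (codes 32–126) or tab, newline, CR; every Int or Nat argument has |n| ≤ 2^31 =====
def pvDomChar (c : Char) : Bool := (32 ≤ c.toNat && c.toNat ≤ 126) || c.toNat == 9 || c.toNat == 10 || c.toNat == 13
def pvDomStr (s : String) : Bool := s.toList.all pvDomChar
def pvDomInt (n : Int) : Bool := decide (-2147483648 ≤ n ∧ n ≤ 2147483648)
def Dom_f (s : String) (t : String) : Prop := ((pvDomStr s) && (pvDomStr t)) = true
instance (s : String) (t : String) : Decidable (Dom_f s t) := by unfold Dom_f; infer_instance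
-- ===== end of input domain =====

-- B replaces A's s.index-decorated comparison sort by a counting sort: count each kept character of
-- t, then walk s once emitting each distinct character count-many times (faster; return-value
-- equivalence only — neither version mutates its arguments).

-- ===== PORT A =====
-- A's while loop: q walks n; p walks m, advancing one Chara per ' ' placeholder.  Consuming m
-- head-first is the same traversal; Python's m[p] raises IndexError when m is exhausted — that
-- happens exactly outside Pre_f, where the .headD default stands in for the raise.
def fillA : List (Char × Int) → List Char → List Char
  | _, [] => []
  | m, x :: n => if x == ' ' then (m.headD (' ', 0)).1 :: fillA m.tail n else x :: fillA m n

def f (s : String) (t : String) : String :=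
  let sl := s.toList
  let tl := t.toList
  -- c[i] = s.index(i): first occurrence, PySem.Chars.find
  let c : PySem.Dict Char Int :=
    sl.foldl (fun d i => d.insert i (PySem.Chars.find sl [i])) PySem.Dict.empty
  -- for i in range(len(t)): t[i] read pairwise via zipIdx; c[t[i]] is present whenever t[i] in s
  let mn : List (Char × Int) × List Char :=
    tl.zipIdx.foldl
      (fun mn p =>
        if PySem.Chars.isIn [p.1] sl then (mn.1 ++ [(p.1, c.getD p.1 0)], mn.2)
        else (mn.1, mn.2.set p.2 p.1))
      ([], List.replicate tl.length ' ')
  -- m.sort(key=lambda x: x.index)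
  let m := PySem.List.sorted mn.1 (fun x => x.2)
  String.mk (fillA m mn.2)

-- ===== PORT B =====
-- ''.join(next(it) if ch in in_s else ch for ch in t): the iterator 'it' is consumed head-first;
-- it is never exhausted on inputs in Pre_f, so the .headD default is never reached there.
def fillB (inS : PySem.Set Char) : List Char → List Char → List Char
  | [], _ => []
  | ch :: tl, it =>
    if inS.contains ch then it.headD ch :: fillB inS tl it.tail
    else ch :: fillB inS tl it

def f_alt (s : String) (t : String) : String :=
  let inS : PySem.Set Char := PySem.Set.ofList s.toList
  -- cnt[ch] = cnt.get(ch, 0) + 1 for the characters of t that occur in s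
  let cnt : PySem.Dict Char Int :=
    t.toList.foldl
      (fun d ch => if inS.contains ch then d.insert ch (d.getD ch 0 + 1) else d)
      PySem.Dict.empty
  -- for ch in s: first time seen, emit ch repeated cnt.get(ch, 0) times (counting sort)
  let ordered : PySem.Set Char × List Char :=
    s.toList.foldl
      (fun st ch =>
        if st.1.contains ch then st
        else (st.1.add ch, st.2 ++ List.replicate (cnt.getD ch 0).toNat ch))
      (PySem.Set.empty, [])
  String.mk (fillB inS t.toList ordered.2)

-- ===== PRECONDITION & SPEC =====
-- Pre_f excludes exactly the inputs where A raises IndexError: a space in t that does not occur in s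
-- is written into n, later mistaken for a placeholder, and m[p] overruns.
def Pre_f (s : String) (t : String) : Prop := ' ' ∈ t.toList → ' ' ∈ s.toList
instance (s : String) (t : String) : Decidable (Pre_f s t) := by unfold Pre_f; infer_instance
def pvWitness_f : String × String := ("abc", "cba")

def Spec_f (s : String) (t : String) (out : String) : Prop := out = f_alt s t
instance (s : String) (t : String) (out : String) : Decidable (Spec_f s t out) := by unfold Spec_f; infer_instance

-- ===== CLAIM (what is proved, stated in full; the proofs are below) =====
def Claim_equal_f : Prop := ∀ (s : String) (t : String), Dom_f s t → Pre_f s t → Spec_f s t (f s t)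
-- ===== LEMMAS AND PROOFS =====

-- 'ch-as-a-1-char-string in s' is membership of ch in s
lemma isIn_singleton (ch : Char) (sl : List Char) :
    PySem.Chars.isIn [ch] sl = decide (ch ∈ sl) := by
  by_cases h : ch ∈ sl
  · simp [h, (PySem.Chars.isIn_iff_infix [ch] sl).2 ((List.singleton_infix_iff ch sl).2 h)]
  · simp only [h, decide_false]
    by_contra hc
    exact h ((List.singleton_infix_iff ch sl).1
      ((PySem.Chars.isIn_iff_infix [ch] sl).1 (by revert hc; cases PySem.Chars.isIn [ch] sl <;> simp)))

-- contains of set(s) is membership in s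
lemma ofList_contains (ch : Char) (sl : List Char) :
    (PySem.Set.ofList sl).contains ch = decide (ch ∈ sl) := by
  by_cases h : ch ∈ sl
  · simp [h]
  · simp only [h, decide_false]
    by_contra hc
    exact h ((PySem.Set.mem_ofList _ _).1 ((PySem.Set.contains_iff _ _).1
      (by revert hc; cases (PySem.Set.ofList sl).contains ch <;> simp)))

-- idxOf is minimal among indices holding ch
lemma idxOf_le_of_getElem? (ch : Char) (l : List Char) (n : Nat) (h : l[n]? = some ch) :
    l.idxOf ch ≤ n := by
  induction l generalizing n with
  | nil => simp at h
  | cons x xs ih =>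
    cases n with
    | zero => simp_all
    | succ m =>
      by_cases hx : x = ch
      · simp [hx]
      · have := ih m (by simpa using h)
        simp only [List.idxOf_cons, beq_iff_eq, Bool.cond_eq_ite, if_neg hx]
        omega

-- s.index(ch) (= Chars.find on the 1-char string) is idxOf
lemma find_singleton_eq_idxOf (sl : List Char) (ch : Char) (h : ch ∈ sl) :
    PySem.Chars.find sl [ch] = (sl.idxOf ch : Int) := by
  have hnn : 0 ≤ PySem.Chars.find sl [ch] :=
    (PySem.Chars.find_nonneg_iff sl [ch]).2 ((List.singleton_infix_iff ch sl).2 h)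
  obtain ⟨hpre, hmin⟩ := PySem.Chars.find_spec hnn
  set n := (PySem.Chars.find sl [ch]).toNat with hn
  have hget : sl[n]? = some ch := by
    obtain ⟨tail, htail⟩ := hpre
    rw [← List.head?_drop, ← htail]; rfl
  have h1 : sl.idxOf ch ≤ n := idxOf_le_of_getElem? ch sl n hget
  have h2 : ¬ sl.idxOf ch < n := by
    intro hlt
    apply hmin _ hlt
    refine ⟨sl.drop (sl.idxOf ch + 1), ?_⟩
    rw [List.singleton_append]
    have hlen : sl.idxOf ch < sl.length := List.idxOf_lt_length_of_mem h
    have hv : sl[sl.idxOf ch] = ch := by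
      have := List.getElem?_idxOf (a := ch) (l := sl) h
      rw [List.getElem?_eq_some_iff] at this
      exact this.2
    nth_rewrite 1 [← hv]
    exact List.getElem_cons_drop hlen
  have : sl.idxOf ch = n := by omega
  omega

-- A's dict loop: value depends only on the key, so the last overwrite equals F ch
lemma dictA_getD (F : Char → Int) (ch : Char) (l : List Char) :
    ∀ d : PySem.Dict Char Int,
      (l.foldl (fun d i => d.insert i (F i)) d).getD ch 0 =
        if ch ∈ l then F ch else d.getD ch 0 := by
  induction l with
  | nil => simp
  | cons x xs ih =>
    intro d
    simp only [List.foldl_cons, ih, PySem.Dict.getD_insert, List.mem_cons]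
    by_cases hx : ch ∈ xs <;> by_cases he : ch = x <;> simp [hx, he]

-- B's counting loop: the stored count is the multiplicity in the filtered list
lemma counterFold_getD (test : Char → Bool) (x : Char) (l : List Char) :
    ∀ d : PySem.Dict Char Int,
      ((l.foldl (fun d ch => if test ch then d.insert ch (d.getD ch 0 + 1) else d) d).getD x 0)
        = d.getD x 0 + ((l.filter test).count x : Int) := by
  induction l with
  | nil => simp
  | cons ch r ih =>
    intro d
    simp only [List.foldl_cons, List.filter_cons]
    by_cases hc : test ch
    · rw [if_pos hc, if_pos hc, ih, PySem.Dict.getD_insert, List.count_cons]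
      by_cases he : x = ch
      · subst he; simp; omega
      · have : (ch == x) = false := by simp [Ne.symm he]
        simp [he, this]
    · rw [if_neg hc, if_neg hc, ih]

-- B's emit loop: multiplicity of the output (count of each char, taken the first time it is seen)
lemma orderedFold_count (g : Char → Nat) (x : Char) (l : List Char) :
    ∀ (seen : PySem.Set Char) (acc : List Char),
      ((l.foldl
        (fun st ch => if st.1.contains ch then st
          else (st.1.add ch, st.2 ++ List.replicate (g ch) ch))
        (seen, acc)).2).count x
      = acc.count x + (if x ∈ l ∧ seen.contains x = false then g x else 0) := by
  induction l with
  | nil => simp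
  | cons ch r ih =>
    intro seen acc
    simp only [List.foldl_cons]
    by_cases hc : seen.contains ch
    · rw [if_pos hc, ih]
      by_cases he : x = ch
      · subst he
        have hx' : x ∈ seen := (PySem.Set.contains_iff _ _).1 hc
        simp [hx']
      · simp [List.mem_cons, he]
    · rw [if_neg hc, ih]
      have hch : ch ∉ seen := fun h => hc ((PySem.Set.contains_iff _ _).2 h)
      by_cases he : x = ch
      · subst he
        simp [List.count_append, hch]
      · have hbe : (ch == x) = false := by simp [Ne.symm he]
        simp [List.count_append, List.count_replicate, hbe, he, List.mem_cons]

-- a set does not contain a non-member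
lemma set_contains_false {s : PySem.Set Char} {x : Char} (h : x ∉ s) : s.contains x = false := by
  by_contra hc
  exact h ((PySem.Set.contains_iff _ _).1 (by revert hc; cases s.contains x <;> simp))

-- B's emit loop: output chars come from s and are ordered by first occurrence in s
lemma orderedFold_sorted (sl : List Char) (g : Char → Nat) :
    ∀ (l p : List Char) (seen : PySem.Set Char) (acc : List Char),
      sl = p ++ l →
      (∀ x, seen.contains x = decide (x ∈ p)) →
      (∀ x ∈ acc, x ∈ p) →
      acc.Pairwise (fun a b => sl.idxOf a ≤ sl.idxOf b) →
      ((∀ x ∈ (l.foldl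
          (fun st ch => if st.1.contains ch then st
            else (st.1.add ch, st.2 ++ List.replicate (g ch) ch))
          (seen, acc)).2, x ∈ sl) ∧
        ((l.foldl
          (fun st ch => if st.1.contains ch then st
            else (st.1.add ch, st.2 ++ List.replicate (g ch) ch))
          (seen, acc)).2).Pairwise (fun a b => sl.idxOf a ≤ sl.idxOf b)) := by
  intro l
  induction l with
  | nil =>
    intro p seen acc hsl hseen hacc hpw
    refine ⟨fun x hx => ?_, hpw⟩
    rw [hsl, List.append_nil]; exact hacc x hx
  | cons ch r ih =>
    intro p seen acc hsl hseen hacc hpw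
    simp only [List.foldl_cons]
    by_cases hc : ch ∈ p
    · rw [if_pos (by rw [hseen]; simp [hc])]
      refine ih (p ++ [ch]) seen acc (by rw [hsl, List.append_assoc]; rfl) ?_ ?_ hpw
      · intro x; rw [hseen]
        by_cases hx : x ∈ p
        · simp [hx]
        · have : x ∉ p ++ [ch] := by
            simp only [List.mem_append, List.mem_singleton]
            rintro (h | h); exact hx h; exact hx (h ▸ hc)
          simp [hx, this]
      · intro x hx; exact List.mem_append_left _ (hacc x hx)
    · rw [if_neg (by rw [hseen]; simp [hc])]
      have hidx_p : ∀ a ∈ p, sl.idxOf a < p.length := by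
        intro a ha
        rw [hsl, List.idxOf_append_of_mem ha]
        exact List.idxOf_lt_length_of_mem ha
      have hidx_ch : sl.idxOf ch = p.length := by
        rw [hsl, List.idxOf_append, if_neg hc]
        simp
      refine ih (p ++ [ch]) (seen.add ch) (acc ++ List.replicate (g ch) ch)
        (by rw [hsl, List.append_assoc]; rfl) ?_ ?_ ?_
      · intro x
        by_cases hx : x ∈ seen.add ch
        · have hm := (PySem.Set.mem_add seen ch x).1 hx
          have hxp : x ∈ p ++ [ch] := by
            rcases hm with h | h
            · have h2 : seen.contains x := (PySem.Set.contains_iff _ _).2 h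
              rw [hseen] at h2
              exact List.mem_append_left _ (of_decide_eq_true h2)
            · subst h; simp
          rw [(PySem.Set.contains_iff _ _).2 hx]
          simp [hxp]
        · have h1 : (seen.add ch).contains x = false := set_contains_false hx
          have hxp : x ∉ p ++ [ch] := by
            simp only [List.mem_append, List.mem_singleton]
            rintro (h | h)
            · exact hx ((PySem.Set.mem_add seen ch x).2 (Or.inl
                ((PySem.Set.contains_iff _ _).1 (by rw [hseen]; simp [h]))))
            · exact hx ((PySem.Set.mem_add seen ch x).2 (Or.inr h))
          rw [h1]
          simp [hxp]
      · intro x hx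
        rcases List.mem_append.1 hx with h | h
        · exact List.mem_append_left _ (hacc x h)
        · have : x = ch := List.eq_of_mem_replicate h
          subst this; simp
      · rw [List.pairwise_append]
        refine ⟨hpw, ?_, ?_⟩
        · rw [List.pairwise_replicate]; right; exact le_refl _
        · intro a ha b hb
          have hb' : b = ch := List.eq_of_mem_replicate hb
          subst hb'
          have := hidx_p a (hacc a ha)
          omega

-- A's range loop: the appended Charas are the kept chars of t in order; n is t with kept chars blanked
lemma phase2
    (test : Char → Bool) (F : Char → Int) (tl : List Char) :
    ∀ (k : Nat) (pre : List Char) (m0 : List (Char × Int)), pre.length = k →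
      ((tl.zipIdx k).foldl
        (fun (mn : List (Char × Int) × List Char) p =>
          if test p.1 then (mn.1 ++ [(p.1, F p.1)], mn.2)
          else (mn.1, mn.2.set p.2 p.1))
        (m0, pre ++ List.replicate tl.length ' '))
      = (m0 ++ (tl.filter test).map (fun ch => (ch, F ch)),
         pre ++ tl.map (fun ch => if test ch then ' ' else ch)) := by
  induction tl with
  | nil => intro k pre m0 _; simp
  | cons ch rest ih =>
    intro k pre m0 hk
    rw [List.zipIdx_cons]
    simp only [List.foldl_cons, List.length_cons, List.replicate_succ]
    by_cases hc : test ch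
    · rw [if_pos hc]
      have := ih (k + 1) (pre ++ [' ']) (m0 ++ [(ch, F ch)]) (by simp [hk])
      simp only [List.append_assoc, List.singleton_append] at this
      rw [this]
      simp [hc]
    · rw [if_neg hc]
      have hset : (pre ++ ' ' :: List.replicate rest.length ' ').set k ch
          = (pre ++ [ch]) ++ List.replicate rest.length ' ' := by
        subst hk; simp
      rw [hset]
      have := ih (k + 1) (pre ++ [ch]) m0 (by simp [hk])
      rw [this]
      simp [hc]

-- inserting a mapped element commutes with mapping, when the comparator agrees on list members
lemma insertBy_map {α β : Type} (g : α → β) (b1 : α → α → Bool) (b2 : β → β → Bool) (x : α) :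
    ∀ l : List α, (∀ y ∈ l, b2 (g x) (g y) = b1 x y) →
      PySem.List.insertBy b2 (g x) (l.map g) = (PySem.List.insertBy b1 x l).map g := by
  intro l
  induction l with
  | nil => intro _; simp [PySem.List.insertBy]
  | cons y ys ih =>
    intro h
    rw [List.map_cons, PySem.List.insertBy.eq_def, PySem.List.insertBy.eq_def (before := b1)]
    simp only
    rw [h y (List.mem_cons_self)]
    by_cases hb : b1 x y
    · simp [hb]
    · simp only [hb, Bool.false_eq_true, ite_false, List.map_cons]
      rw [ih (fun z hz => h z (List.mem_cons_of_mem _ hz))]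

-- insertion sort of a mapped list is the map of the insertion sort (comparators agreeing on P-elements)
lemma foldl_insertBy_map {α β : Type} (P : α → Prop) (g : α → β)
    (b1 : α → α → Bool) (b2 : β → β → Bool)
    (h : ∀ x y, P x → P y → b2 (g x) (g y) = b1 x y) :
    ∀ (xs acc : List α), (∀ x ∈ xs, P x) → (∀ a ∈ acc, P a) →
      xs.foldl (fun a x => PySem.List.insertBy b2 (g x) a) (acc.map g)
        = (xs.foldl (fun a x => PySem.List.insertBy b1 x a) acc).map g := by
  intro xs
  induction xs with
  | nil => intro acc _ _; rfl
  | cons x rest ih =>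
    intro acc hxs hacc
    simp only [List.foldl_cons]
    rw [insertBy_map g b1 b2 x acc
        (fun y hy => h x y (hxs x List.mem_cons_self) (hacc y hy))]
    exact ih _ (fun z hz => hxs z (List.mem_cons_of_mem _ hz))
      (fun a ha => by
        rcases (PySem.List.insertBy_mem_iff _ x a acc).1 ha with h' | h'
        · exact h' ▸ hxs x List.mem_cons_self
        · exact hacc a h')

-- the two fills agree: placeholders of A are exactly B's membership hits, and m carries keep's chars
lemma fill_eq (inS : PySem.Set Char) (key : Char → Int) :
    ∀ (tl keep : List Char),
      tl.countP (fun ch => decide (ch ∈ inS)) ≤ keep.length →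
      (∀ ch ∈ tl, ch ∉ inS → ch ≠ ' ') →
      fillA (keep.map (fun ch => (ch, key ch)))
          (tl.map (fun ch => if inS.contains ch then ' ' else ch))
        = fillB inS tl keep := by
  intro tl
  induction tl with
  | nil => intro keep _ _; rfl
  | cons ch rest ih =>
    intro keep hcount hsp
    simp only [List.map_cons]
    rw [List.countP_cons] at hcount
    by_cases hm : ch ∈ inS
    · have hc : inS.contains ch = true := (PySem.Set.contains_iff _ _).2 hm
      rw [if_pos hc]
      cases keep with
      | nil => simp [hm] at hcount
      | cons kh kt =>
        have hrec := ih kt (by simp [hm] at hcount; omega)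
          (fun c hcm => hsp c (List.mem_cons_of_mem _ hcm))
        simp [fillA, fillB, hm]
        simpa using hrec
    · have hc : inS.contains ch = false := by
        by_contra hcc
        exact hm ((PySem.Set.contains_iff _ _).1 (by revert hcc; cases inS.contains ch <;> simp))
      rw [hc, if_neg (by simp)]
      have hne : (ch == ' ') = false := by
        simpa using hsp ch List.mem_cons_self hm
      have hrec := ih keep (by simp [hm] at hcount; omega)
        (fun c hcm => hsp c (List.mem_cons_of_mem _ hcm))
      simp [fillA, fillB, hm, hne]
      simpa using hrec

-- idxOf is injective on members
lemma idxOf_inj (sl : List Char) (a b : Char) (ha : a ∈ sl) (hb : b ∈ sl)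
    (h : sl.idxOf a = sl.idxOf b) : a = b := by
  have h1 := List.getElem_idxOf (x := a) (xs := sl) (List.idxOf_lt_length_of_mem ha)
  have h2 := List.getElem_idxOf (x := b) (xs := sl) (List.idxOf_lt_length_of_mem hb)
  rw [← h1, ← h2]
  congr 1

-- main equivalence
lemma f_eq_f_alt (s t : String) (hpre : ' ' ∈ t.toList → ' ' ∈ s.toList) :
    f s t = f_alt s t := by
  simp only [f, f_alt]
  set sl := s.toList with hsl
  set tl := t.toList with htl
  set inS : PySem.Set Char := PySem.Set.ofList sl with hinS
  set c : PySem.Dict Char Int :=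
    sl.foldl (fun d i => d.insert i (PySem.Chars.find sl [i])) PySem.Dict.empty with hc
  set cnt : PySem.Dict Char Int :=
    tl.foldl (fun d ch => if inS.contains ch then d.insert ch (d.getD ch 0 + 1) else d)
      PySem.Dict.empty with hcnt
  -- membership tests agree
  have hcon : ∀ ch, inS.contains ch = decide (ch ∈ sl) := fun ch => ofList_contains ch sl
  have htest : ∀ ch, PySem.Chars.isIn [ch] sl = decide (ch ∈ sl) := fun ch => isIn_singleton ch sl
  -- phase 2 of A
  have hph2 := phase2 (fun ch => PySem.Chars.isIn [ch] sl) (fun ch => c.getD ch 0) tl 0 [] []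
    (by simp)
  simp only [List.nil_append] at hph2 ⊢
  rw [hph2]
  have hfilter : tl.filter (fun ch => PySem.Chars.isIn [ch] sl)
      = tl.filter (fun ch => decide (ch ∈ sl)) :=
    List.filter_congr (fun ch _ => by rw [htest])
  have hmask : tl.map (fun ch => if PySem.Chars.isIn [ch] sl then ' ' else ch)
      = tl.map (fun ch => if inS.contains ch then ' ' else ch) :=
    List.map_congr_left (fun ch _ => by rw [htest, hcon])
  rw [hfilter, hmask]
  set keep0 := tl.filter (fun ch => decide (ch ∈ sl)) with hkeep0
  have hkmem : ∀ x ∈ keep0, x ∈ sl := by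
    intro x hx
    rw [hkeep0] at hx
    exact of_decide_eq_true ((List.mem_filter.1 hx).2)
  -- A's sort key on members of sl is the first-occurrence index
  have hkeyA : ∀ ch ∈ sl, c.getD ch 0 = (sl.idxOf ch : Int) := by
    intro ch hm
    rw [hc, dictA_getD, if_pos hm, find_singleton_eq_idxOf sl ch hm]
  -- B's counter on members of sl is the multiplicity in keep0
  have hcount : ∀ ch ∈ sl, (cnt.getD ch 0).toNat = keep0.count ch := by
    intro ch hm
    rw [hcnt, counterFold_getD, PySem.Dict.getD_empty]
    have : tl.filter (fun ch => inS.contains ch) = keep0 :=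
      List.filter_congr (fun x _ => by rw [hcon])
    rw [this]; simp
  -- B's ordered output
  set ordered := (sl.foldl
      (fun st ch => if st.1.contains ch then st
        else (st.1.add ch, st.2 ++ List.replicate (cnt.getD ch 0).toNat ch))
      ((PySem.Set.empty : PySem.Set Char), ([] : List Char))).2 with hord
  -- counts of ordered equal counts of keep0, hence Perm
  have hperm : ordered.Perm keep0 := by
    rw [List.perm_iff_count]
    intro x
    rw [hord, orderedFold_count]
    by_cases hx : x ∈ sl
    · have hemp : (PySem.Set.empty : PySem.Set Char).contains x = false := by rfl
      simp only [List.count_nil, hemp, hx, true_and, Nat.zero_add, if_pos trivial]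
      exact hcount x hx
    · have : keep0.count x = 0 := by
        rw [List.count_eq_zero]
        intro hmem
        exact hx (hkmem x hmem)
      simp [hx, this]
  have hmempw := orderedFold_sorted sl (fun ch => (cnt.getD ch 0).toNat) sl [] PySem.Set.empty []
    (by simp) (fun x => by rfl) (by intro x hx; simp at hx) (by simp)
  have hmemO : ∀ x ∈ ordered, x ∈ sl := hmempw.1
  have hpwO : ordered.Pairwise (fun a b => sl.idxOf a ≤ sl.idxOf b) := hmempw.2
  -- A's sorted list equals ordered
  set S := PySem.List.sorted keep0 (fun ch => (sl.idxOf ch : Int)) with hS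
  have hmemS : ∀ x ∈ S, x ∈ sl := by
    intro x hx
    exact hkmem x ((PySem.List.mem_sorted keep0 _ _ x).1 hx)
  have hpwS : S.Pairwise (fun a b => sl.idxOf a ≤ sl.idxOf b) := by
    have := PySem.List.sorted_pairwise (xs := keep0) (key := fun ch => (sl.idxOf ch : Int))
    exact this.imp (by intro a b h; exact_mod_cast h)
  have hSO : S = ordered := by
    refine List.eq_of_perm_of_sorted ?_ hpwS hpwO
      (((PySem.List.sorted_perm _ _ _).trans hperm.symm))
    intro a b ha hb h1 h2
    exact idxOf_inj sl a b (hmemS a ha) (hmemO b hb) (le_antisymm h1 h2)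
  -- A's sort of the decorated list is the decoration of S
  have hsortmap :
      PySem.List.sorted (keep0.map (fun ch => (ch, c.getD ch 0))) (fun x => x.2)
        = S.map (fun ch => (ch, c.getD ch 0)) := by
    rw [PySem.List.sorted_eq_foldl_insertBy, hS, PySem.List.sorted_eq_foldl_insertBy,
      List.foldl_map]
    exact foldl_insertBy_map (fun ch => ch ∈ sl) (fun ch => (ch, c.getD ch 0))
      (fun a b => decide ((sl.idxOf a : Int) < (sl.idxOf b : Int)))
      (fun a b => decide (a.2 < b.2))
      (fun x y hx hy => by simp only [hkeyA x hx, hkeyA y hy])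
      keep0 []
      (fun x hx => hkmem x hx)
      (by intro a ha; simp at ha)
  rw [hsortmap, hSO]
  -- fill
  congr 1
  refine fill_eq inS (fun ch => c.getD ch 0) tl ordered ?_ ?_
  · rw [hperm.length_eq, hkeep0, ← List.countP_eq_length_filter]
    refine le_of_eq (List.countP_congr ?_)
    intro x _
    simp [hinS, PySem.Set.mem_ofList]
  · intro ch hch hnc heq
    subst heq
    exact hnc ((PySem.Set.mem_ofList _ _).2 (hpre hch))

-- ===== VERDICT (by name: the statements are the Claim_ definitions above) =====
theorem f_spec : Claim_equal_f := by
  intro s t _ hpre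
  unfold Spec_f
  exact f_eq_f_alt s t hpre
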